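-- pv_equiv track=rewrite | github.com/klenwell/code-challenges | python/advent-of-code/2023/day-13.py | reflection_pivot
-- ===== SOURCE A (Python) =====
-- def reflection_pivot(seq):
--     max_n = len(seq)
--     for n, _ in enumerate(seq[0:-1]):
--         pivot = n+1
--         ref_len = min(pivot, max_n-n-1)
--         i0, i1 = pivot-ref_len, pivot
--         m0, m1 = pivot, pivot+ref_len
--
--         left_image = ''.join(c for c in seq[i0:i1])
--         right_image = ''.join(c[::-1] for c in seq[m0:m1])
--         mirror_image = right_image[::-1]
--
--         if left_image == mirror_image:
--             return pivot
--
--     return False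
-- ===== SOURCE B (Python) =====
-- def reflection_pivot(seq):
--     n = len(seq)
--     off = [0]
--     t = 0
--     for row in seq:
--         t += len(row)
--         off.append(t)
--     RF = ''.join(seq)[::-1]
--     G = ''.join(row[::-1] for row in seq)
--     for p in range(1, n):
--         r = min(p, n - p)
--         if RF[t - off[p]:t - off[p - r]] == G[off[p]:off[p + r]]:
--             return p
--     return False
-- ===== Notes on version B (the rewrite author's own statement) =====
-- stated objective: faster
-- what changed: B precomputes prefix character offsets and two global strings (the full text reversed, and the per-row-reversed text) once, so each pivot test becomes one comparison of two index-computed slices instead of A's per-pivot generator joins, per-row reversal and whole-image reversal.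
-- outside the precondition, e.g. on reflection_pivot([]): A returns False, B returns False; on reflection_pivot(['ab', 'cd']): A returns False, B returns False
import Mathlib
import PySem

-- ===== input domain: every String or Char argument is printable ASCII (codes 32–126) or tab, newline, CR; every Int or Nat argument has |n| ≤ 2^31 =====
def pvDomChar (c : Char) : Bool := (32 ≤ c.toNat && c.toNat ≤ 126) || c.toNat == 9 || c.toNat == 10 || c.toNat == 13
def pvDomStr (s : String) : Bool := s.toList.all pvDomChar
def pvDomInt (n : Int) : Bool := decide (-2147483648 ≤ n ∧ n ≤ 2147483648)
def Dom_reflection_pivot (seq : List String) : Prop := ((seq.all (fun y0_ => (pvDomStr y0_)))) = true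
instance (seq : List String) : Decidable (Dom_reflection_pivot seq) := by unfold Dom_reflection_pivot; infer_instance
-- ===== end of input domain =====

-- B replaces A's per-pivot string joining/reversal by once-precomputed prefix offsets and two
-- global character lists, so each pivot test is two index-arithmetic slice comparisons (objective: alternative).

-- ===== PORT A =====
-- for-loop with early return, ported as structural recursion over the enumerate list
def pvA_loop (seq : List String) (max_n : Int) : List (Int × String) → Int
  | [] => 0   -- Python `return False` (False == 0)
  | (n, _) :: rest =>
    let pivot := n + 1
    let ref_len := min pivot (max_n - n - 1)
    let i0 := pivot - ref_len
    let i1 := pivot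
    let m0 := pivot
    let m1 := pivot + ref_len
    -- ''.join over strings: work on the character lists (PySem convention)
    let left_image := (PySem.List.slice seq (some i0) (some i1)).flatMap String.toList
    let right_image := (PySem.List.slice seq (some m0) (some m1)).flatMap (fun c => c.toList.reverse)
    let mirror_image := right_image.reverse
    if left_image = mirror_image then pivot else pvA_loop seq max_n rest

def reflection_pivot (seq : List String) : Int :=
  let max_n : Int := seq.length
  pvA_loop seq max_n (PySem.List.enumerate (PySem.List.slice seq none (some (-1))) 0)

-- ===== PORT B =====
-- for-loop with early return over range(1, n)
def pvB_loop (off : List Int) (t : Int) (RF G : List Char) (n : Int) : List Int → Int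
  | [] => 0   -- Python `return False` (False == 0)
  | p :: rest =>
    let r := min p (n - p)
    if PySem.List.slice RF (some (t - PySem.List.pyGetD off p 0)) (some (t - PySem.List.pyGetD off (p - r) 0))
        = PySem.List.slice G (some (PySem.List.pyGetD off p 0)) (some (PySem.List.pyGetD off (p + r) 0))
    then p else pvB_loop off t RF G n rest

def reflection_pivot_alt (seq : List String) : Int :=
  let n : Int := seq.length
  -- off/t accumulated together: off = [0]; t = 0; for row in seq: t += len(row); off.append(t)
  let st := seq.foldl (fun (st : List Int × Int) row =>
      let t := st.2 + (row.toList.length : Int)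
      (st.1 ++ [t], t)) ([0], 0)
  let off := st.1
  let t := st.2
  let RF := (seq.flatMap String.toList).reverse   -- ''.join(seq)[::-1]
  let G := seq.flatMap (fun row => row.toList.reverse)   -- ''.join(row[::-1] for row in seq)
  pvB_loop off t RF G n (PySem.List.pyRange 1 n 1)

-- ===== PRECONDITION & SPEC =====
-- Pre_ excludes exactly the inputs with no reflection pivot, on which A returns the bool False
-- (not a value of the declared return type Int); B returns False there too.
def Pre_reflection_pivot (seq : List String) : Prop :=
  ∃ p < seq.length, 1 ≤ p ∧
    ((seq.drop (p - min p (seq.length - p))).take (min p (seq.length - p))).flatMap String.toList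
      = (((seq.drop p).take (min p (seq.length - p))).reverse).flatMap String.toList
instance (seq : List String) : Decidable (Pre_reflection_pivot seq) := by
  unfold Pre_reflection_pivot; infer_instance
def pvWitness_reflection_pivot : List String := ["ab", "ab"]

def Spec_reflection_pivot (seq : List String) (out : Int) : Prop := out = reflection_pivot_alt seq
instance (seq : List String) (out : Int) : Decidable (Spec_reflection_pivot seq out) := by unfold Spec_reflection_pivot; infer_instance

-- ===== CLAIM (what is proved, stated in full; the proofs are below) =====
def Claim_equal_reflection_pivot : Prop := ∀ (seq : List String), Dom_reflection_pivot seq → Pre_reflection_pivot seq → Spec_reflection_pivot seq (reflection_pivot seq)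

-- ===== LEMMAS AND PROOFS =====

-- prefix-sum of character counts of the first q rows, under a row-to-chars map f
def pvOfs (f : String → List Char) (seq : List String) (q : Nat) : Nat :=
  ((seq.take q).flatMap f).length

theorem pvOfs_add (f : String → List Char) (seq : List String) {a b : Nat} (hab : a ≤ b) :
    pvOfs f seq b = pvOfs f seq a + (((seq.drop a).take (b - a)).flatMap f).length := by
  unfold pvOfs
  have h : b = a + (b - a) := by omega
  rw [h, List.take_add, List.flatMap_append, List.length_append]
  simp

theorem pvOfs_congr (f g : String → List Char) (seq : List String)
    (h : ∀ s, (f s).length = (g s).length) (q : Nat) : pvOfs f seq q = pvOfs g seq q := by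
  unfold pvOfs
  induction seq.take q with
  | nil => rfl
  | cons x xs ih => simp [List.flatMap_cons, ih, h x]

-- the aligned slice of the flattened rows is the flattening of the row block
theorem pvSlice_flatMap (f : String → List Char) (seq : List String) {a b : Nat} (hab : a ≤ b) :
    ((seq.flatMap f).drop (pvOfs f seq a)).take (pvOfs f seq b - pvOfs f seq a)
      = ((seq.drop a).take (b - a)).flatMap f := by
  have h1 : seq.flatMap f = (seq.take a).flatMap f ++ (seq.drop a).flatMap f := by
    rw [← List.flatMap_append, List.take_append_drop]
  have h2 : (seq.flatMap f).drop (pvOfs f seq a) = (seq.drop a).flatMap f := by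
    rw [h1]; exact List.drop_left
  rw [h2, pvOfs_add f seq hab]
  have h3 : (seq.drop a).flatMap f
      = ((seq.drop a).take (b - a)).flatMap f ++ (((seq.drop a).drop (b - a)).flatMap f) := by
    rw [← List.flatMap_append, List.take_append_drop]
  rw [Nat.add_sub_cancel_left, h3]
  exact List.take_left

-- characterisation of B's offset-building fold
theorem pvFold_eq (seq : List String) : ∀ (acc : List Int) (t0 : Int),
    seq.foldl (fun (st : List Int × Int) row =>
        let t := st.2 + (row.toList.length : Int)
        (st.1 ++ [t], t)) (acc, t0)
      = (acc ++ (List.range seq.length).map (fun k => t0 + (pvOfs String.toList seq (k + 1) : Int)),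
         t0 + (pvOfs String.toList seq seq.length : Int)) := by
  induction seq with
  | nil => intro acc t0; simp [pvOfs]
  | cons row rest ih =>
    intro acc t0
    rw [List.foldl_cons, ih]
    simp only []
    refine Prod.ext ?_ ?_ <;> simp only []
    · rw [List.length_cons, List.range_succ_eq_map, List.map_cons, List.map_map,
        List.append_assoc]
      congr 1
      have h0 : pvOfs String.toList (row :: rest) 1 = row.toList.length := by
        simp [pvOfs]
      rw [List.singleton_append]
      congr 1
      · rw [h0]
      · apply List.map_congr_left
        intro k _
        have : pvOfs String.toList (row :: rest) (k + 1 + 1)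
            = row.toList.length + pvOfs String.toList rest (k + 1) := by
          simp [pvOfs, List.take_succ_cons]
        rw [Function.comp_apply, this]
        push_cast
        ring
    · have : pvOfs String.toList (row :: rest) (rest.length + 1)
          = row.toList.length + pvOfs String.toList rest rest.length := by
        simp [pvOfs, List.take_succ_cons]
      rw [List.length_cons, this]
      push_cast
      ring

-- off[q] is the prefix character count, for q ≤ len(seq)
theorem pvOff_get (seq : List String) {q : Nat} (hq : q ≤ seq.length) :
    PySem.List.pyGetD
      ((seq.foldl (fun (st : List Int × Int) row =>
          let t := st.2 + (row.toList.length : Int)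
          (st.1 ++ [t], t)) ([0], 0)).1) (q : Int) 0
      = (pvOfs String.toList seq q : Int) := by
  rw [pvFold_eq, PySem.List.pyGetD_natCast]
  cases q with
  | zero => simp [pvOfs]
  | succ k =>
    have hk : k < seq.length := by omega
    have hlen : ((List.range seq.length).map
        (fun k => ((0:Int) + (pvOfs String.toList seq (k + 1) : Int)))).length = seq.length := by
      simp
    rw [List.singleton_append, List.getD_cons_succ]
    rw [List.getD_eq_getElem _ _ (by rw [hlen]; exact hk)]
    simp

-- the two loop-body tests, named so the loops can be unfolded one step at a time
abbrev pvCondA (seq : List String) (max_n n : Int) : Prop :=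
  (PySem.List.slice seq (some (n + 1 - min (n + 1) (max_n - n - 1))) (some (n + 1))).flatMap String.toList
    = ((PySem.List.slice seq (some (n + 1)) (some (n + 1 + min (n + 1) (max_n - n - 1)))).flatMap
        (fun c => c.toList.reverse)).reverse

abbrev pvCondB (off : List Int) (t : Int) (RF G : List Char) (n p : Int) : Prop :=
  PySem.List.slice RF (some (t - PySem.List.pyGetD off p 0))
      (some (t - PySem.List.pyGetD off (p - min p (n - p)) 0))
    = PySem.List.slice G (some (PySem.List.pyGetD off p 0))
      (some (PySem.List.pyGetD off (p + min p (n - p)) 0))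

theorem pvA_loop_cons (seq : List String) (m n : Int) (s : String) (rest : List (Int × String)) :
    pvA_loop seq m ((n, s) :: rest)
      = if pvCondA seq m n then n + 1 else pvA_loop seq m rest := rfl

theorem pvB_loop_cons (off : List Int) (t : Int) (RF G : List Char) (n p : Int) (rest : List Int) :
    pvB_loop off t RF G n (p :: rest)
      = if pvCondB off t RF G n p then p else pvB_loop off t RF G n rest := rfl

theorem pvLoops_eq (seq : List String) (off : List Int) (t : Int) (RF G : List Char) (m n : Int) :
    ∀ l : List (Int × String),
      (∀ q ∈ l, pvCondA seq m q.1 ↔ pvCondB off t RF G n (q.1 + 1)) →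
      pvA_loop seq m l = pvB_loop off t RF G n (l.map (fun q => q.1 + 1)) := by
  intro l
  induction l with
  | nil => intro _; rfl
  | cons q rest ih =>
    intro h
    obtain ⟨k, s⟩ := q
    rw [List.map_cons, pvA_loop_cons, pvB_loop_cons]
    by_cases hc : pvCondA seq m k
    · rw [if_pos hc, if_pos ((h (k, s) List.mem_cons_self).mp hc)]
    · rw [if_neg hc, if_neg (fun hb => hc ((h (k, s) List.mem_cons_self).mpr hb))]
      exact ih (fun q hq => h q (List.mem_cons_of_mem _ hq))

theorem pvMap_add_one_pyRange (a b : Int) :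
    (PySem.List.pyRange a b).map (fun x => x + 1) = PySem.List.pyRange (a + 1) (b + 1) := by
  rw [PySem.List.pyRange_one, PySem.List.pyRange_one, List.map_map]
  have h : b + 1 - (a + 1) = b - a := by ring
  rw [h]
  apply List.map_congr_left
  intro k _
  simp only [Function.comp_apply]
  ring

theorem pvCond_iff (seq : List String) (k : Int) (h0 : 0 ≤ k) (h1 : k + 1 < (seq.length : Int)) :
    pvCondA seq (seq.length : Int) k
      ↔ pvCondB ((seq.foldl (fun (st : List Int × Int) row =>
            let t := st.2 + (row.toList.length : Int); (st.1 ++ [t], t)) ([0], 0)).1)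
          ((seq.foldl (fun (st : List Int × Int) row =>
            let t := st.2 + (row.toList.length : Int); (st.1 ++ [t], t)) ([0], 0)).2)
          ((seq.flatMap String.toList).reverse)
          (seq.flatMap (fun row => row.toList.reverse))
          (seq.length : Int) (k + 1) := by
  set N := seq.length with hN
  set P : Nat := (k + 1).toNat with hPdef
  have hPcast : ((P : Nat) : Int) = k + 1 := Int.toNat_of_nonneg (by omega)
  have hPN : P < N := by omega
  have hP1 : 1 ≤ P := by omega
  have hmm : (N : Int) - k - 1 = (N : Int) - (k + 1) := by ring
  set r : Int := min (k + 1) ((N : Int) - (k + 1)) with hrdef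
  have hr0 : 0 ≤ r := by
    rw [hrdef]; omega
  set R : Nat := r.toNat with hRdef
  have hRcast : ((R : Nat) : Int) = r := Int.toNat_of_nonneg hr0
  have hRP : R ≤ P := by
    have : r ≤ k + 1 := min_le_left _ _
    omega
  have hPRN : P + R ≤ N := by
    have : r ≤ (N : Int) - (k + 1) := min_le_right _ _
    omega
  -- the offsets
  set T : Nat := pvOfs String.toList seq N with hT
  have hofs1 : pvOfs String.toList seq (P - R) ≤ pvOfs String.toList seq P := by
    rw [pvOfs_add String.toList seq (show P - R ≤ P by omega)]; omega
  have hofs2 : pvOfs String.toList seq P ≤ T := by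
    rw [hT, pvOfs_add String.toList seq (show P ≤ N by omega)]; omega
  have hofs3 : pvOfs String.toList seq P ≤ pvOfs String.toList seq (P + R) := by
    rw [pvOfs_add String.toList seq (show P ≤ P + R by omega)]; omega
  -- A's two slices
  have hminR : min (k + 1) ((N : Int) - k - 1) = ((R : Nat) : Int) := by
    rw [hmm, hRcast, hrdef]
  have hsA1 : PySem.List.slice seq (some (k + 1 - min (k + 1) ((N : Int) - k - 1))) (some (k + 1))
      = (seq.drop (P - R)).take R := by
    rw [hminR, ← hPcast, show ((P : Nat) : Int) - ((R : Nat) : Int) = ((P - R : Nat) : Int) by omega,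
      PySem.List.slice_natCast, show P - (P - R) = R by omega]
  have hsA2 : PySem.List.slice seq (some (k + 1)) (some (k + 1 + min (k + 1) ((N : Int) - k - 1)))
      = (seq.drop P).take R := by
    rw [hminR, ← hPcast, show ((P : Nat) : Int) + ((R : Nat) : Int) = ((P + R : Nat) : Int) by omega,
      PySem.List.slice_natCast, show P + R - P = R by omega]
  -- B's fold: the final t and the off lookups
  have ht : ((seq.foldl (fun (st : List Int × Int) row =>
        let t := st.2 + (row.toList.length : Int); (st.1 ++ [t], t)) ([0], 0)).2)
      = ((T : Nat) : Int) := by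
    rw [pvFold_eq]; simp [hT, hN]
  have hoffP : PySem.List.pyGetD ((seq.foldl (fun (st : List Int × Int) row =>
        let t := st.2 + (row.toList.length : Int); (st.1 ++ [t], t)) ([0], 0)).1) (k + 1) 0
      = ((pvOfs String.toList seq P : Nat) : Int) := by
    rw [← hPcast, pvOff_get seq (by omega)]
  have hoffL : PySem.List.pyGetD ((seq.foldl (fun (st : List Int × Int) row =>
        let t := st.2 + (row.toList.length : Int); (st.1 ++ [t], t)) ([0], 0)).1)
        (k + 1 - r) 0
      = ((pvOfs String.toList seq (P - R) : Nat) : Int) := by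
    rw [show k + 1 - r = ((P - R : Nat) : Int) by omega, pvOff_get seq (by omega)]
  have hoffR : PySem.List.pyGetD ((seq.foldl (fun (st : List Int × Int) row =>
        let t := st.2 + (row.toList.length : Int); (st.1 ++ [t], t)) ([0], 0)).1)
        (k + 1 + r) 0
      = ((pvOfs String.toList seq (P + R) : Nat) : Int) := by
    rw [show k + 1 + r = ((P + R : Nat) : Int) by omega, pvOff_get seq (by omega)]
  -- B's left slice equals the reverse of A's left image
  have hFlen : (seq.flatMap String.toList).length = T := by
    rw [hT]; unfold pvOfs; rw [hN, List.take_length]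
  have hsB1 : PySem.List.slice (seq.flatMap String.toList).reverse
        (some (((T : Nat) : Int) - ((pvOfs String.toList seq P : Nat) : Int)))
        (some (((T : Nat) : Int) - ((pvOfs String.toList seq (P - R) : Nat) : Int)))
      = (((seq.drop (P - R)).take R).flatMap String.toList).reverse := by
    rw [show ((T : Nat) : Int) - ((pvOfs String.toList seq P : Nat) : Int)
        = ((T - pvOfs String.toList seq P : Nat) : Int) by omega,
      show ((T : Nat) : Int) - ((pvOfs String.toList seq (P - R) : Nat) : Int)
        = ((T - pvOfs String.toList seq (P - R) : Nat) : Int) by omega,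
      PySem.List.slice_natCast,
      show T - pvOfs String.toList seq (P - R) - (T - pvOfs String.toList seq P)
        = pvOfs String.toList seq P - pvOfs String.toList seq (P - R) by omega]
    have e1 : (seq.flatMap String.toList).reverse.drop (T - pvOfs String.toList seq P)
        = ((seq.flatMap String.toList).take (pvOfs String.toList seq P)).reverse := by
      rw [List.reverse_take, hFlen]
    rw [e1]
    have e2 : ((seq.flatMap String.toList).take (pvOfs String.toList seq P)).reverse.take
          (pvOfs String.toList seq P - pvOfs String.toList seq (P - R))
        = (((seq.flatMap String.toList).take (pvOfs String.toList seq P)).drop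
            (pvOfs String.toList seq (P - R))).reverse := by
      rw [List.reverse_drop, List.length_take, hFlen, min_eq_left hofs2]
    rw [e2, List.drop_take]
    have e3 := pvSlice_flatMap String.toList seq (show P - R ≤ P by omega)
    rw [e3, show P - (P - R) = R by omega]
  -- B's right slice equals A's right image
  have hcongr : ∀ q, pvOfs (fun row => row.toList.reverse) seq q = pvOfs String.toList seq q :=
    fun q => pvOfs_congr _ _ seq (fun s => by simp) q
  have hsB2 : PySem.List.slice (seq.flatMap (fun row => row.toList.reverse))
        (some ((pvOfs String.toList seq P : Nat) : Int))
        (some ((pvOfs String.toList seq (P + R) : Nat) : Int))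
      = ((seq.drop P).take R).flatMap (fun row => row.toList.reverse) := by
    rw [PySem.List.slice_natCast, ← hcongr, ← hcongr]
    have e3 := pvSlice_flatMap (fun row => row.toList.reverse) seq (show P ≤ P + R by omega)
    rw [e3, show P + R - P = R by omega]
  -- put everything together
  unfold pvCondA pvCondB
  rw [hsA1, hsA2, ht, hoffP, hoffL, hoffR, hsB1, hsB2]
  rw [List.reverse_eq_iff]

theorem pvRange_shift (N : Nat) :
    PySem.List.pyRange 1 (((N - 1 : Nat) : Int) + 1) = PySem.List.pyRange 1 (N : Int) := by
  cases N with
  | zero =>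
    rw [PySem.List.pyRange_one_eq_nil (by norm_num), PySem.List.pyRange_one_eq_nil (by norm_num)]
  | succ n =>
    rw [show (((n + 1 - 1 : Nat) : Int) + 1) = ((n + 1 : Nat) : Int) by omega]

-- ===== VERDICT (by name: the statement is the Claim_ definition above) =====
theorem reflection_pivot_spec : Claim_equal_reflection_pivot := by
  intro seq _ _
  show reflection_pivot seq = reflection_pivot_alt seq
  simp only [reflection_pivot, reflection_pivot_alt]
  rw [PySem.List.slice_to_neg_one]
  have hmap : (PySem.List.enumerate seq.dropLast 0).map (fun q => q.1 + 1)
      = PySem.List.pyRange 1 (seq.length : Int) := by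
    have h1 : (PySem.List.enumerate seq.dropLast 0).map (fun q => q.1 + 1)
        = ((PySem.List.enumerate seq.dropLast 0).map (fun q => q.1)).map (fun x => x + 1) := by
      rw [List.map_map]; rfl
    rw [h1, PySem.List.map_fst_enumerate, List.length_dropLast, zero_add,
      pvMap_add_one_pyRange, zero_add, pvRange_shift]
  rw [← hmap]
  apply pvLoops_eq
  intro q hq
  have hq1 : q.1 ∈ (PySem.List.enumerate seq.dropLast 0).map (fun x => x.1) :=
    List.mem_map_of_mem hq
  rw [PySem.List.map_fst_enumerate, List.length_dropLast] at hq1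
  have hb := PySem.List.mem_pyRange_one.mp hq1
  exact pvCond_iff seq q.1 hb.1 (by omega)
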